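-- pv_equiv track=rewrite | github.com/posl/comment_recommendation | script/split_gen/4_time/zh/143_C/9.py | findSlimeCount
-- ===== SOURCE A (Python) =====
-- def findSlimeCount(s):
--     if len(s) == 0:
--         return 0
--     res = 1
--     for i in range(1, len(s)):
--         if s[i] != s[i-1]:
--             res += 1
--     return res
-- ===== SOURCE B (Python) =====
-- def findSlimeCount(s):
--     # Divide and conquer: groups(left) + groups(right), minus 1 if the run at the
--     # split boundary is shared by both halves.
--     if len(s) == 0:
--         return 0
--     if len(s) == 1:
--         return 1
--     m = len(s) // 2
--     merge = 1 if s[m - 1] == s[m] else 0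
--     return findSlimeCount(s[:m]) + findSlimeCount(s[m:]) - merge
-- ===== Notes on version B (the rewrite author's own statement) =====
-- stated objective: alternative
-- what changed: Replaces A's single linear pass comparing each character with its predecessor by a divide-and-conquer recursion: split the string at the midpoint, count groups in each half recursively, and subtract one when the two halves meet inside the same run.
import Mathlib
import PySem

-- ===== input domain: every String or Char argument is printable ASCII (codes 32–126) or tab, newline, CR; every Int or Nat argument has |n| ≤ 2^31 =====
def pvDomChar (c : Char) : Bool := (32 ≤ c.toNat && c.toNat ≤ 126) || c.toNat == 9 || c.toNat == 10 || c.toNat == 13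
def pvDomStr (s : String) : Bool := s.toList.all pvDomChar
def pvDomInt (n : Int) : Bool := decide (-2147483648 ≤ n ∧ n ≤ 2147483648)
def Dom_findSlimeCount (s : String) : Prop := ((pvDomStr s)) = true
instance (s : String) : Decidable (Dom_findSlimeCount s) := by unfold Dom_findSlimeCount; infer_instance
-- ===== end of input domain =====

-- B replaces A's single linear pass by a divide-and-conquer recursion (split at the
-- midpoint, count each half, merge) — an alternative decomposition, not faster.

-- ===== PORT A =====
-- literal port of A: explicit loop over range(1, len(s)), comparing s[i] with s[i-1]
def findSlimeCount (s : String) : Int :=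
  if PySem.Str.len s = 0 then 0
  else
    (PySem.List.pyRange 1 (PySem.Str.len s) 1).foldl
      (fun res i => if PySem.Str.pyGet? s i ≠ PySem.Str.pyGet? s (i - 1) then res + 1 else res) 1

-- ===== PORT B =====
-- port of Source B's divide-and-conquer on the character list; the slices s[:m], s[m:]
-- (0 ≤ m ≤ len) are exactly take/drop, and s[m-1], s[m] are in-range lookups
def pvDC : List Char → Int
  | [] => 0
  | [_] => 1
  | c1 :: c2 :: rest =>
      let l := c1 :: c2 :: rest
      let m := l.length / 2
      let merge : Int := if l[m - 1]? = l[m]? then 1 else 0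
      pvDC (l.take m) + pvDC (l.drop m) - merge
termination_by l => l.length
decreasing_by
  · simp [List.length_take]; omega
  · simp; omega

def findSlimeCount_alt (s : String) : Int := pvDC s.toList

-- ===== PRECONDITION & SPEC =====
def Spec_findSlimeCount (s : String) (out : Int) : Prop := out = findSlimeCount_alt s
instance (s : String) (out : Int) : Decidable (Spec_findSlimeCount s out) := by unfold Spec_findSlimeCount; infer_instance

-- ===== CLAIM (what is proved, stated in full; the proofs are below) =====
def Claim_equal_findSlimeCount : Prop := ∀ (s : String), Dom_findSlimeCount s → Spec_findSlimeCount s (findSlimeCount s)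

-- ===== LEMMAS AND PROOFS =====

-- number of adjacent unequal pairs in the chain c :: t (common characterisation)
def pvChainCount (c : Char) : List Char → Int
  | [] => 0
  | d :: t => (if d ≠ c then 1 else 0) + pvChainCount d t

-- group count of a list, via the chain characterisation
def pvG : List Char → Int
  | [] => 0
  | c :: t => 1 + pvChainCount c t

lemma pvFoldA : ∀ (t : List Char) (c : Char) (k : Nat) (s : String) (acc : Int),
    s.toList.drop k = c :: t →
    (PySem.List.pyRange ((k : Int) + 1) ((s.toList.length : Nat) : Int) 1).foldl
      (fun res i => if PySem.Str.pyGet? s i ≠ PySem.Str.pyGet? s (i - 1) then res + 1 else res) acc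
    = acc + pvChainCount c t := by
  intro t
  induction t with
  | nil =>
    intro c k s acc h
    have hlen : s.toList.length = k + 1 := by
      have h1 := congrArg List.length h
      rw [List.length_drop, List.length_cons, List.length_nil] at h1
      omega
    rw [hlen]
    rw [PySem.List.pyRange_one_eq_nil (by push_cast; omega)]
    simp [pvChainCount]
  | cons d t ih =>
    intro c k s acc h
    have hlen : k + 1 < s.toList.length := by
      have h1 := congrArg List.length h
      rw [List.length_drop, List.length_cons, List.length_cons] at h1
      omega
    have hk : s.toList[(k : Nat)]? = some c := by
      have h0 : (s.toList.drop k)[0]? = some c := by rw [h]; rfl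
      rw [List.getElem?_drop] at h0; simpa using h0
    have hk1 : s.toList[(k + 1 : Nat)]? = some d := by
      have h0 : (s.toList.drop k)[1]? = some d := by rw [h]; rfl
      rw [List.getElem?_drop] at h0; simpa using h0
    have hdrop : s.toList.drop (k + 1) = d :: t := by
      have : s.toList.drop (k + 1) = (s.toList.drop k).drop 1 := by
        rw [List.drop_drop]
      rw [this, h]; rfl
    rw [PySem.List.pyRange_one_cons (by push_cast; omega)]
    rw [List.foldl_cons]
    have e1 : PySem.Str.pyGet? s ((k : Int) + 1) = some d := by
      have : ((k : Int) + 1) = ((k + 1 : Nat) : Int) := by omega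
      rw [this, PySem.Str.pyGet?_natCast, hk1]
    have e0 : PySem.Str.pyGet? s ((k : Int) + 1 - 1) = some c := by
      have : ((k : Int) + 1 - 1) = ((k : Nat) : Int) := by ring
      rw [this, PySem.Str.pyGet?_natCast, hk]
    rw [e1, e0]
    have hrw : ((k : Int) + 1) + 1 = ((k + 1 : Nat) : Int) + 1 := by omega
    rw [hrw]
    rw [ih d (k + 1) s _ hdrop]
    simp only [pvChainCount]
    by_cases hdc : d = c
    · simp [hdc]
    · simp [hdc]
      ring

-- splitting a chain: count over an append decomposes at the last element of the prefix
lemma pvChain_append : ∀ (t1 : List Char) (c : Char) (t2 : List Char),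
    pvChainCount c (t1 ++ t2) = pvChainCount c t1 + pvChainCount (t1.getLastD c) t2 := by
  intro t1
  induction t1 with
  | nil => intro c t2; simp [pvChainCount]
  | cons d t' ih =>
    intro c t2
    simp only [List.cons_append, pvChainCount, List.getLastD_cons, ih d t2]
    ring

-- merge rule: group count of a concatenation of two nonempty lists
lemma pvG_append (c d : Char) (t1 t2 : List Char) :
    pvG ((c :: t1) ++ (d :: t2))
      = pvG (c :: t1) + pvG (d :: t2) - (if t1.getLastD c = d then 1 else 0) := by
  simp only [List.cons_append, pvG, pvChain_append t1 c (d :: t2), pvChainCount, ne_eq,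
    List.getLastD_eq_getLast?]
  by_cases h : t1.getLast?.getD c = d
  · simp [h]
    ring
  · rw [if_neg h, if_pos (fun hh => h hh.symm)]
    ring

lemma pvLast?_cons : ∀ (t : List Char) (c : Char), (c :: t).getLast? = some (t.getLastD c) := by
  intro t
  induction t with
  | nil => intro c; rfl
  | cons d t' ih => intro c; rw [List.getLast?_cons_cons, ih d, List.getLastD_cons]

-- pvDC computes the group count
lemma pvDC_eq_pvG : ∀ (n : Nat) (l : List Char), l.length ≤ n → pvDC l = pvG l := by
  intro n
  induction n with
  | zero =>
    intro l hl
    have : l = [] := List.eq_nil_of_length_eq_zero (Nat.le_zero.mp hl)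
    subst this; simp [pvDC, pvG]
  | succ n ih =>
    intro l hl
    match l with
    | [] => simp [pvDC, pvG]
    | [c] => simp [pvDC, pvG, pvChainCount]
    | c1 :: c2 :: rest =>
      rw [pvDC]
      set L := c1 :: c2 :: rest with hL
      have hlen : 2 ≤ L.length := by simp [hL]
      set m := L.length / 2 with hm
      have hm1 : 1 ≤ m := by omega
      have hmlt : m < L.length := by omega
      have htl : (L.take m).length = m := by simp; omega
      have hdl : (L.drop m).length = L.length - m := by simp
      have iht := ih (L.take m) (by omega)
      have ihd := ih (L.drop m) (by omega)
      rw [iht, ihd]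
      -- decompose the halves as cons
      obtain ⟨a, t1, hta⟩ : ∃ a t1, L.take m = a :: t1 := by
        cases h : L.take m with
        | nil => exfalso; rw [h] at htl; simp at htl; omega
        | cons a t1 => exact ⟨a, t1, rfl⟩
      obtain ⟨b, t2, htb⟩ : ∃ b t2, L.drop m = b :: t2 := by
        cases h : L.drop m with
        | nil => exfalso; rw [h] at hdl; simp at hdl; omega
        | cons b t2 => exact ⟨b, t2, rfl⟩
      have hsplit : L = (a :: t1) ++ (b :: t2) := by
        rw [← hta, ← htb, List.take_append_drop]
      -- the boundary test equals the merge test of pvG_append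
      have hA : L[m - 1]? = some (t1.getLastD a) := by
        have hlt1 : (a :: t1).length = m := by rw [← hta]; exact htl
        have h2 : (a :: t1).getLast? = some (t1.getLastD a) := pvLast?_cons t1 a
        rw [List.getLast?_eq_getElem?, hlt1] at h2
        have h1 : L[m - 1]? = (L.take m)[m - 1]? :=
          (List.getElem?_take_of_lt (show m - 1 < m by omega)).symm
        rw [h1, hta]; exact h2
      have hB : L[m]? = some b := by
        have : (L.drop m)[0]? = L[m]? := by
          rw [List.getElem?_drop, Nat.add_zero]
        rw [← this, htb]; rfl
      rw [hA, hB]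
      have hGL : pvG L = pvG (a :: t1) + pvG (b :: t2) - (if t1.getLastD a = b then 1 else 0) := by
        rw [hsplit]; exact pvG_append a b t1 t2
      rw [hta, htb, hGL]
      by_cases h : t1.getLastD a = b
      · simp only [List.getLastD_eq_getLast?] at h
        simp [h]
      · simp only [List.getLastD_eq_getLast?] at h
        simp [h]

-- ===== VERDICT (by name: the statement is the Claim_ definition above) =====
theorem findSlimeCount_spec : Claim_equal_findSlimeCount := by
  intro s _
  unfold Spec_findSlimeCount findSlimeCount findSlimeCount_alt
  rw [pvDC_eq_pvG s.toList.length s.toList le_rfl]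
  cases hcs : s.toList with
  | nil =>
    rw [if_pos (by simp [PySem.Str.len_eq, hcs])]
    simp [pvG]
  | cons c t =>
    rw [if_neg (by simp [PySem.Str.len_eq, hcs]; omega)]
    rw [PySem.Str.len_eq]
    have := pvFoldA t c 0 s 1 (by simpa using hcs)
    simpa [hcs, pvG] using this
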